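-- pv_equiv track=rewrite | github.com/andresfung/algoritmos-y-programacion | proyecto Andrés Fung/EURO_2024.py/Numero_vampiro.py | is_vampire_number
-- ===== SOURCE A (Python) =====
-- from itertools import permutations
--
-- def is_vampire_number(number):
--     number_str = str(number)
--     length = len(number_str)
--     # Revisa si el numero es par
--     if length % 2 != 0:
--         return False
--     # Genera todas las posibilidades de colmillos y sus combinanciones para confirmar si alguna es igual al numero original
--     length_half = length // 2
--     possible_fangs = permutations(number_str, length_half)
--
--     fangs_set = set()
--
--     for fangs in possible_fangs:
--         fangs_str = ''.join(fangs)
--         if fangs_str[0] != '0':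
--             other_fangs = number_str
--             for num in fangs_str:
--                 other_fangs = other_fangs.replace(num, '', 1)
--             if other_fangs[0] != '0':
--                 fang1, fang2 = int(fangs_str), int(other_fangs)
--                 if fang1 * fang2 == number:
--                     fangs_set.add((fang1, fang2))
--
--     return bool(fangs_set)
-- ===== SOURCE B (Python) =====
-- def is_vampire_number(number):
--     s = str(number)
--     if len(s) % 2 != 0:
--         return False
--     half = len(s) // 2
--     for d in range(10 ** (half - 1), 10 ** half):
--         if number % d != 0:
--             continue
--         rest = list(s)
--         ok = True
--         for c in str(d):
--             if c in rest:
--                 rest.remove(c)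
--             else:
--                 ok = False
--                 break
--         if ok and rest[0] != '0' and int(''.join(rest)) * d == number:
--             return True
--     return False
-- ===== Notes on version B (the rewrite author's own statement) =====
-- stated objective: faster
-- what changed: Replaces A's enumeration of all half-length digit permutations (joined, residual built by repeated str.replace, results collected in a set) by a single numeric scan over half-length candidate factors d, pruned by number % d, checking that d's digits can be removed from the number's digit string and that the residual times d gives the number, with early return.
-- outside the precondition, e.g. on is_vampire_number(-100): A returns False, B returns False; on is_vampire_number(-1): A raises ValueError, B raises ValueError; on is_vampire_number(-12345): A raises ValueError, B returns False
import Mathlib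
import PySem

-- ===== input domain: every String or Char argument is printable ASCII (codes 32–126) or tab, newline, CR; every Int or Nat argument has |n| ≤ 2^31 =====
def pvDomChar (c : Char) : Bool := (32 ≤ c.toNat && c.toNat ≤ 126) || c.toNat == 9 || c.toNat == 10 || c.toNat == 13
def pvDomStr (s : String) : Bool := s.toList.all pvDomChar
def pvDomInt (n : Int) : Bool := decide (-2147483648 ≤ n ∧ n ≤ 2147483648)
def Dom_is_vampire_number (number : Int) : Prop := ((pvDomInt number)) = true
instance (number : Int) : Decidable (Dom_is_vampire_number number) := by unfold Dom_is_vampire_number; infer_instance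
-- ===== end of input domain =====

-- B replaces A's factorial enumeration of digit permutations by a numeric scan over
-- half-length candidate factors with divisibility pruning and early return (faster).

-- ===== PORT A =====

-- str(n) (shared by both ports)
def pyStr (n : Int) : List Char := PySem.Int.toChars n

-- int(cs) for a string of decimal digits — exact on nonempty all-digit strings, the only
-- int() arguments reachable inside Pre_ (number ≥ 0 there whenever this code runs).
def pyIntDigits (cs : List Char) : Int :=
  cs.foldl (fun a c => 10 * a + ((c.toNat : Int) - 48)) 0

def is_vampire_number (number : Int) : Bool :=
  let number_str : List Char := pyStr number                     -- str(number)
  let length : Int := PySem.List.len number_str                 -- len(number_str)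
  if length % 2 ≠ 0 then false
  else
    let length_half := length / 2
    let possible_fangs := PySem.List.permutations number_str length_half.toNat
    let fangs_set : PySem.Set (Int × Int) :=
      possible_fangs.foldl (fun fangs_set fangs =>
        let fangs_str := fangs                                   -- ''.join(fangs)
        -- fangs_str[0] != '0' : fangs_str is nonempty on every input reaching this line
        if fangs_str.head?.getD ' ' ≠ '0' then
          -- other_fangs = number_str; for num in fangs_str: other_fangs = other_fangs.replace(num, '', 1)
          -- str.replace(c, '', 1) for a single char = remove the first occurrence = List.erase (exact)
          let other_fangs := fangs_str.foldl (fun of num => of.erase num) number_str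
          if other_fangs.head?.getD ' ' ≠ '0' then
            let fang1 := pyIntDigits fangs_str
            let fang2 := pyIntDigits other_fangs
            if fang1 * fang2 = number then fangs_set.add (fang1, fang2) else fangs_set
          else fangs_set
        else fangs_set) PySem.Set.empty
    !(PySem.Set.len fangs_set == 0)                              -- bool(fangs_set)

-- ===== PORT B =====

def is_vampire_number_alt (number : Int) : Bool :=
  let s : List Char := pyStr number                              -- str(number)
  if PySem.List.len s % 2 ≠ 0 then false
  else
    let half := PySem.List.len s / 2
    -- for d in range(10**(half-1), 10**half): ... return True / fall through to False
    (PySem.List.pyRange ((10:Int) ^ (half - 1).toNat) ((10:Int) ^ half.toNat) 1).any (fun d =>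
      if PySem.Int.mod number d ≠ 0 then false                   -- if number % d != 0: continue
      else
        -- rest = list(s); for c in str(d): remove first occurrence, else ok = False / break
        let r : Option (List Char) :=
          (PySem.Int.toChars d).foldl
            (fun st c => st.bind (fun rest => if c ∈ rest then some (rest.erase c) else none))
            (some s)
        match r with
        | none => false                                          -- not ok
        | some rest =>
          -- rest is nonempty whenever this line runs (len(rest) = half ≥ 1), so rest[0] is total here
          decide (rest.head?.getD ' ' ≠ '0') && (pyIntDigits rest * d == number))

-- ===== PRECONDITION & SPEC =====

-- Pre_ excludes negative numbers whose str() has even length: there A feeds permuted fang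
-- strings with an embedded '-' to int(), which raises ValueError on most of them, and the
-- few that fall through to False (e.g. -100) do so only by accident of the digit order.
def Pre_is_vampire_number (number : Int) : Prop :=
  0 ≤ number ∨ (PySem.Int.toChars number).length % 2 = 1
instance (number : Int) : Decidable (Pre_is_vampire_number number) := by
  unfold Pre_is_vampire_number; infer_instance

def pvWitness_is_vampire_number : Int := 1260

def Spec_is_vampire_number (number : Int) (out : Bool) : Prop := out = is_vampire_number_alt number
instance (number : Int) (out : Bool) : Decidable (Spec_is_vampire_number number out) := by unfold Spec_is_vampire_number; infer_instance

-- ===== CLAIM (what is proved, stated in full; the proofs are below) =====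
def Claim_equal_is_vampire_number : Prop := ∀ (number : Int), Dom_is_vampire_number number → Pre_is_vampire_number number → Spec_is_vampire_number number (is_vampire_number number)

-- ===== LEMMAS AND PROOFS =====

-- ---- decimal digit strings ----

def isDig (c : Char) : Prop := 48 ≤ c.toNat ∧ c.toNat ≤ 57

-- reference decimal printer
def decDigits (n : Nat) : List Char :=
  if h : n < 10 then [Nat.digitChar n]
  else decDigits (n / 10) ++ [Nat.digitChar (n % 10)]
  decreasing_by exact Nat.div_lt_self (by omega) (by omega)

theorem toDigitsCore_eq_decDigits (f n : Nat) (ds : List Char)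
    (hf : n < 10 ^ f) (hf0 : 0 < f) :
    Nat.toDigitsCore 10 f n ds = decDigits n ++ ds := by
  induction f generalizing n ds with
  | zero => omega
  | succ f ih =>
    rw [Nat.toDigitsCore]
    by_cases h10 : n < 10
    · have hz : n / 10 = 0 := Nat.div_eq_of_lt h10
      rw [decDigits, dif_pos h10]
      simp [hz, Nat.mod_eq_of_lt h10]
    · have hne : ¬ n / 10 = 0 := by omega
      have hf1 : 0 < f := by
        rcases Nat.eq_zero_or_pos f with h | h
        · subst h; simp at hf; omega
        · exact h
      have hlt : n / 10 < 10 ^ f := by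
        have : n < 10 * 10 ^ f := by
          have := pow_succ 10 f
          omega
        exact Nat.div_lt_of_lt_mul this
      simp only [hne, if_false]
      rw [ih _ _ hlt hf1]
      conv_rhs => rw [decDigits, dif_neg h10]
      simp

theorem toDigits_eq_decDigits (n : Nat) : Nat.toDigits 10 n = decDigits n := by
  have h1 : n < 10 ^ (n + 1) := by
    calc n < 10 ^ n := Nat.lt_pow_self (by norm_num)
    _ < 10 ^ (n + 1) := by exact Nat.pow_lt_pow_succ (by norm_num)
  simpa using toDigitsCore_eq_decDigits (n + 1) n [] h1 (by omega)

theorem toChars_nonneg (n : Int) (h : 0 ≤ n) :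
    PySem.Int.toChars n = decDigits n.toNat := by
  unfold PySem.Int.toChars
  rw [if_neg (by omega)]
  exact toDigits_eq_decDigits _

-- decimal value of a digit string, over Nat
def valNat (cs : List Char) : Nat :=
  cs.foldl (fun a c => 10 * a + (c.toNat - 48)) 0

theorem digitChar_toNat (k : Nat) (h : k < 10) : (Nat.digitChar k).toNat = 48 + k := by
  interval_cases k <;> rfl

theorem decDigits_isDig (n : Nat) : ∀ c ∈ decDigits n, isDig c := by
  induction n using decDigits.induct with
  | case1 n h =>
    rw [decDigits, dif_pos h]
    intro c hc
    simp only [List.mem_singleton] at hc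
    subst hc
    simp only [isDig, digitChar_toNat n h]
    omega
  | case2 n h ih =>
    rw [decDigits, dif_neg h]
    intro c hc
    rcases List.mem_append.mp hc with hc | hc
    · exact ih c hc
    · simp only [List.mem_singleton] at hc
      subst hc
      have h10 : n % 10 < 10 := Nat.mod_lt _ (by omega)
      simp only [isDig, digitChar_toNat _ h10]
      omega

theorem decDigits_ne_nil (n : Nat) : decDigits n ≠ [] := by
  rw [decDigits]
  split <;> simp

theorem decDigits_head (n : Nat) (h : 0 < n) : (decDigits n).head?.getD ' ' ≠ '0' := by
  induction n using decDigits.induct with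
  | case1 n hlt =>
    rw [decDigits, dif_pos hlt]
    simp only [List.head?_cons, Option.getD_some]
    intro hc
    have := congrArg Char.toNat hc
    rw [digitChar_toNat n hlt] at this
    simp [Char.toNat] at this
    omega
  | case2 n hlt ih =>
    rw [decDigits, dif_neg hlt]
    have hne := decDigits_ne_nil (n / 10)
    have hpos : 0 < n / 10 := by omega
    cases hd : decDigits (n / 10) with
    | nil => exact absurd hd hne
    | cons a t =>
      have := ih hpos
      rw [hd] at this
      simpa using this

theorem valNat_decDigits (n : Nat) : valNat (decDigits n) = n := by
  induction n using decDigits.induct with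
  | case1 n hlt =>
    rw [decDigits, dif_pos hlt]
    simp [valNat, digitChar_toNat n hlt]
  | case2 n hlt ih =>
    rw [decDigits, dif_neg hlt]
    have h10 : n % 10 < 10 := Nat.mod_lt _ (by omega)
    unfold valNat at ih ⊢
    rw [List.foldl_append, ih]
    simp [digitChar_toNat _ h10]
    omega

theorem isDig_digitChar (c : Char) (h : isDig c) : Nat.digitChar (c.toNat - 48) = c := by
  obtain ⟨h1, h2⟩ := h
  apply Char.ext
  apply UInt32.toNat_inj.mp
  show (Nat.digitChar (c.toNat - 48)).toNat = c.toNat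
  rw [digitChar_toNat _ (by omega)]
  omega

theorem valNat_append_singleton (xs : List Char) (c : Char) :
    valNat (xs ++ [c]) = 10 * valNat xs + (c.toNat - 48) := by
  unfold valNat
  rw [List.foldl_append]
  rfl

theorem valNat_pos (cs : List Char) (hd : ∀ c ∈ cs, isDig c) (hne : cs ≠ [])
    (hz : cs.head?.getD ' ' ≠ '0') : 0 < valNat cs := by
  cases cs with
  | nil => exact absurd rfl hne
  | cons c t =>
    have hc : isDig c := hd c (by simp)
    have hc0 : c ≠ '0' := by simpa using hz
    have hcv : 48 < c.toNat := by
      obtain ⟨h1, h2⟩ := hc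
      rcases Nat.lt_or_ge 48 c.toNat with h | h
      · exact h
      · exfalso
        have : c.toNat = 48 := by omega
        exact hc0 (by
          apply Char.ext
          apply UInt32.toNat_inj.mp
          show c.toNat = ('0' : Char).toNat
          simpa using this)
    have aux : ∀ (l : List Char) (a : Nat), 0 < a →
        0 < l.foldl (fun a c => 10 * a + (c.toNat - 48)) a := by
      intro l
      induction l with
      | nil => intro a ha; simpa using ha
      | cons x l ih =>
        intro a ha
        simp only [List.foldl_cons]
        exact ih _ (by omega)
    unfold valNat
    simp only [List.foldl_cons]
    exact aux t _ (by omega)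

theorem decDigits_valNat (cs : List Char) (hd : ∀ c ∈ cs, isDig c) (hne : cs ≠ [])
    (hz : cs.head?.getD ' ' ≠ '0') : decDigits (valNat cs) = cs := by
  induction cs using List.reverseRecOn with
  | nil => exact absurd rfl hne
  | append_singleton xs c ih =>
    have hc : isDig c := hd c (by simp)
    rw [valNat_append_singleton]
    cases xs with
    | nil =>
      have : c.toNat - 48 < 10 := by obtain ⟨h1, h2⟩ := hc; omega
      simp only [valNat, List.foldl_nil, Nat.mul_zero, Nat.zero_add]
      rw [decDigits]
      simp [this, isDig_digitChar c hc]
    | cons x t =>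
      have hxsne : (x :: t) ≠ ([] : List Char) := by simp
      have hdx : ∀ c' ∈ x :: t, isDig c' := by
        intro c' hc'
        exact hd c' (List.mem_append.mpr (Or.inl hc'))
      have hzx : (x :: t).head?.getD ' ' ≠ '0' := by
        simpa using hz
      have hpos : 0 < valNat (x :: t) := valNat_pos _ hdx hxsne hzx
      have hc10 : c.toNat - 48 < 10 := by obtain ⟨h1, h2⟩ := hc; omega
      rw [decDigits]
      rw [dif_neg (by omega)]
      have hdiv : (10 * valNat (x :: t) + (c.toNat - 48)) / 10 = valNat (x :: t) := by omega
      have hmod : (10 * valNat (x :: t) + (c.toNat - 48)) % 10 = c.toNat - 48 := by omega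
      rw [hdiv, hmod, ih hdx hxsne hzx, isDig_digitChar c hc]

theorem pyIntDigits_eq_valNat (cs : List Char) (hd : ∀ c ∈ cs, isDig c) :
    pyIntDigits cs = (valNat cs : Int) := by
  have aux : ∀ (l : List Char), (∀ c ∈ l, isDig c) → ∀ (a : Nat),
      l.foldl (fun a c => 10 * a + ((c.toNat : Int) - 48)) (a : Int)
        = ((l.foldl (fun a c => 10 * a + (c.toNat - 48)) a : Nat) : Int) := by
    intro l
    induction l with
    | nil => intro _ a; simp
    | cons x l ih =>
      intro hdl a
      have hx : isDig x := hdl x (by simp)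
      simp only [List.foldl_cons]
      have : (10 * (a : Int) + ((x.toNat : Int) - 48)) = ((10 * a + (x.toNat - 48) : Nat) : Int) := by
        obtain ⟨h1, h2⟩ := hx
        push_cast
        omega
      rw [this, ih (fun c hc => hdl c (by simp [hc]))]
  have := aux cs hd 0
  simpa [pyIntDigits, valNat] using this

theorem valNat_lt (cs : List Char) (hd : ∀ c ∈ cs, isDig c) :
    valNat cs < 10 ^ cs.length := by
  have aux : ∀ (l : List Char), (∀ c ∈ l, isDig c) → ∀ (a : Nat),
      l.foldl (fun a c => 10 * a + (c.toNat - 48)) a < (a + 1) * 10 ^ l.length := by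
    intro l
    induction l with
    | nil => intro _ a; simp
    | cons x l ih =>
      intro hdl a
      have hx : isDig x := hdl x (by simp)
      simp only [List.foldl_cons, List.length_cons]
      have h1 := ih (fun c hc => hdl c (by simp [hc])) (10 * a + (x.toNat - 48))
      have h2 : (10 * a + (x.toNat - 48) + 1) * 10 ^ l.length ≤ (a + 1) * 10 ^ (l.length + 1) := by
        obtain ⟨hx1, hx2⟩ := hx
        calc (10 * a + (x.toNat - 48) + 1) * 10 ^ l.length
            ≤ (10 * (a + 1)) * 10 ^ l.length := Nat.mul_le_mul_right _ (by omega)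
          _ = (a + 1) * 10 ^ (l.length + 1) := by ring
      omega
  have := aux cs hd 0
  unfold valNat
  omega

theorem le_valNat (cs : List Char) (hd : ∀ c ∈ cs, isDig c) (hne : cs ≠ [])
    (hz : cs.head?.getD ' ' ≠ '0') : 10 ^ (cs.length - 1) ≤ valNat cs := by
  have aux : ∀ (l : List Char) (a : Nat),
      a * 10 ^ l.length ≤ l.foldl (fun a c => 10 * a + (c.toNat - 48)) a := by
    intro l
    induction l with
    | nil => intro a; simp
    | cons x l ih =>
      intro a
      simp only [List.foldl_cons, List.length_cons]
      have h1 := ih (10 * a + (x.toNat - 48))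
      have h2 : a * 10 ^ (l.length + 1) ≤ (10 * a + (x.toNat - 48)) * 10 ^ l.length := by
        calc a * 10 ^ (l.length + 1) = (10 * a) * 10 ^ l.length := by ring
          _ ≤ (10 * a + (x.toNat - 48)) * 10 ^ l.length := Nat.mul_le_mul_right _ (by omega)
      omega
  cases cs with
  | nil => exact absurd rfl hne
  | cons c t =>
    have hc : isDig c := hd c (by simp)
    have hc0 : c ≠ '0' := by simpa using hz
    have hcv : 48 < c.toNat := by
      rcases Nat.lt_or_ge 48 c.toNat with h | h
      · exact h
      · exfalso
        have : c.toNat = 48 := by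
          obtain ⟨h1, h2⟩ := hc; omega
        exact hc0 (by
          apply Char.ext
          apply UInt32.toNat_inj.mp
          show c.toNat = ('0' : Char).toNat
          simpa using this)
    unfold valNat
    simp only [List.foldl_cons, List.length_cons]
    have h1 := aux t (10 * 0 + (c.toNat - 48))
    have h2 : 10 ^ (t.length + 1 - 1) ≤ (10 * 0 + (c.toNat - 48)) * 10 ^ t.length := by
      have h1 : 1 ≤ 10 * 0 + (c.toNat - 48) := by omega
      calc 10 ^ (t.length + 1 - 1) = 1 * 10 ^ t.length := by simp
        _ ≤ (10 * 0 + (c.toNat - 48)) * 10 ^ t.length := Nat.mul_le_mul_right _ h1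
    omega

theorem decDigits_bounds (m : Nat) (hm : 0 < m) :
    10 ^ ((decDigits m).length - 1) ≤ m ∧ m < 10 ^ (decDigits m).length := by
  have h0 : (decDigits m).head?.getD ' ' ≠ '0' := decDigits_head m hm
  have h1 := le_valNat (decDigits m) (decDigits_isDig m) (decDigits_ne_nil m) h0
  have h2 := valNat_lt (decDigits m) (decDigits_isDig m)
  rw [valNat_decDigits] at h1 h2
  exact ⟨h1, h2⟩

theorem decDigits_length_eq (m h : Nat) (hpos : 1 ≤ h)
    (h1 : 10 ^ (h - 1) ≤ m) (h2 : m < 10 ^ h) : (decDigits m).length = h := by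
  have hm : 0 < m := lt_of_lt_of_le (pow_pos (by norm_num) _) h1
  obtain ⟨e1, e2⟩ := decDigits_bounds m hm
  by_contra hne
  rcases Nat.lt_or_ge (decDigits m).length h with hlt | hge
  · have : (10:Nat) ^ (decDigits m).length ≤ 10 ^ (h - 1) :=
      Nat.pow_le_pow_right (by norm_num) (by omega)
    omega
  · have hgt : h < (decDigits m).length := by omega
    have : (10:Nat) ^ h ≤ 10 ^ ((decDigits m).length - 1) :=
      Nat.pow_le_pow_right (by norm_num) (by omega)
    omega

-- ---- the shared characterisation: "A's textual probe hits" ----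
-- a half-digit-length divisor a of n whose digits are contained in n's digits and whose
-- residual string (n's digits minus the first occurrence of each digit of a) spells n / a.
def ResidualHit (n : Int) : Prop :=
  ∃ a ∈ List.range (10 ^ ((decDigits n.toNat).length / 2)),
    (decDigits a).length = (decDigits n.toNat).length / 2 ∧
    (decDigits a).Subperm (decDigits n.toNat) ∧ a ∣ n.toNat ∧
    (decDigits n.toNat).diff (decDigits a) = decDigits (n.toNat / a)

-- ---- A-side: the fold over the permutation list builds a nonempty set iff some fang passes ----

theorem foldl_add_ne_nil {α β : Type} [BEq β] (step : PySem.Set β → α → PySem.Set β)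
    (C : α → Prop) [DecidablePred C] (g : α → β)
    (hstep : ∀ s x, step s x = if C x then s.add (g x) else s) :
    ∀ (l : List α) (acc : PySem.Set β),
      (l.foldl step acc ≠ [] ↔ (acc ≠ [] ∨ ∃ x ∈ l, C x)) := by
  have hadd : ∀ (s : PySem.Set β) (y : β), s.add y ≠ [] := by
    intro s y
    unfold PySem.Set.add
    split
    · rename_i hcon
      intro h; subst h; simp at hcon
    · simp
  intro l
  induction l with
  | nil => intro acc; simp
  | cons x l ih =>
    intro acc
    simp only [List.foldl_cons, hstep]
    by_cases hC : C x
    · rw [if_pos hC, ih]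
      simp only [List.mem_cons]
      constructor
      · intro _; exact Or.inr ⟨x, Or.inl rfl, hC⟩
      · intro _; exact Or.inl (hadd acc (g x))
    · rw [if_neg hC, ih]
      simp only [List.mem_cons]
      constructor
      · rintro (h | ⟨y, hy, hCy⟩)
        · exact Or.inl h
        · exact Or.inr ⟨y, Or.inr hy, hCy⟩
      · rintro (h | ⟨y, hy, hCy⟩)
        · exact Or.inl h
        · rcases hy with rfl | hy
          · exact absurd hCy hC
          · exact Or.inr ⟨y, hy, hCy⟩

theorem set_nonzero_iff (S : PySem.Set (Int × Int)) :
    ((!(PySem.Set.len S == 0)) = true) ↔ S ≠ [] := by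
  unfold PySem.Set.len
  simp [List.length_eq_zero_iff]

-- every half-length sub-permutation occurs in the itertools.permutations list
theorem mem_permutations_of_subperm (x : List Char) : ∀ (xs : List Char),
    x.Subperm xs → x ∈ PySem.List.permutations xs x.length := by
  induction x with
  | nil =>
    intro xs _
    rw [List.length_nil, PySem.List.permutations_zero]
    simp
  | cons c x ih =>
    intro xs hsub
    have hc : c ∈ xs := hsub.subset (by simp)
    have hidx := List.idxOf_lt_length_of_mem hc
    rw [List.length_cons, PySem.List.permutations_succ, List.mem_flatMap]
    refine ⟨xs.idxOf c, List.mem_range.mpr hidx, ?_⟩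
    have hget : xs[xs.idxOf c]? = some c := by
      rw [List.getElem?_eq_getElem hidx]
      exact congrArg some (List.getElem_idxOf hidx)
    rw [hget]
    simp only [List.mem_map]
    refine ⟨x, ?_, rfl⟩
    have herase : xs.eraseIdx (xs.idxOf c) = xs.erase c :=
      (List.erase_eq_eraseIdx_of_idxOf rfl).symm
    rw [herase]
    apply ih
    have h1 : (c :: x).Subperm (c :: xs.erase c) :=
      hsub.trans (List.perm_cons_erase hc).subperm
    exact (List.subperm_cons c).mp h1

theorem perm_append_diff (x ss : List Char) (h : x.Subperm ss) :
    (x ++ ss.diff x).Perm ss := by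
  have h' : (↑x : Multiset Char) ≤ ↑ss := Multiset.coe_le.mpr h
  rw [← Multiset.coe_eq_coe, ← Multiset.coe_add x (ss.diff x), ← Multiset.coe_sub ss x]
  exact add_tsub_cancel_of_le h'

theorem toChars_natCast (m : Nat) : PySem.Int.toChars ((m : Nat) : Int) = decDigits m := by
  rw [toChars_nonneg _ (by positivity), Int.toNat_natCast]

theorem pos_of_even_len (n : Int) (hn : 0 ≤ n)
    (heven : (PySem.Int.toChars n).length % 2 = 0) : 0 < n.toNat := by
  rcases Nat.eq_zero_or_pos n.toNat with h0 | h
  · exfalso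
    have hd0 : decDigits 0 = ['0'] := by rw [decDigits]; rfl
    rw [toChars_nonneg n hn, h0, hd0] at heven
    simp at heven
  · exact h

theorem cast_pow10 (k : Nat) : ((10 ^ k : Nat) : Int) = (10:Int) ^ k := by
  push_cast; ring

theorem L_A (n : Int) (hn : 0 ≤ n) :
    is_vampire_number n = true ↔
      ((PySem.Int.toChars n).length % 2 = 0 ∧ ResidualHit n) := by
  unfold is_vampire_number
  simp only [pyStr, PySem.List.len_eq]
  by_cases hpar : (PySem.Int.toChars n).length % 2 = 0
  case neg =>
    rw [if_pos (by omega)]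
    constructor
    · intro h; exact absurd h Bool.false_ne_true
    · rintro ⟨h, -⟩; exact absurd h hpar
  case pos =>
    rw [if_neg (by omega)]
    rw [set_nonzero_iff]
    rw [foldl_add_ne_nil _
      (fun x => x.head?.getD ' ' ≠ '0' ∧
        (x.foldl (fun of num => of.erase num) (PySem.Int.toChars n)).head?.getD ' ' ≠ '0' ∧
        pyIntDigits x * pyIntDigits (x.foldl (fun of num => of.erase num) (PySem.Int.toChars n)) = n)
      (fun x => (pyIntDigits x,
        pyIntDigits (x.foldl (fun of num => of.erase num) (PySem.Int.toChars n))))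
      (by
        intro st x
        dsimp only
        by_cases c1 : x.head?.getD ' ' ≠ '0'
        · by_cases c2 : (x.foldl (fun of num => of.erase num) (PySem.Int.toChars n)).head?.getD ' ' ≠ '0'
          · by_cases c3 : pyIntDigits x * pyIntDigits (x.foldl (fun of num => of.erase num) (PySem.Int.toChars n)) = n
            · rw [if_pos c1, if_pos c2, if_pos c3, if_pos ⟨c1, c2, c3⟩]
            · rw [if_pos c1, if_pos c2, if_neg c3, if_neg (by tauto)]
          · rw [if_pos c1, if_neg c2, if_neg (by tauto)]
        · rw [if_neg c1, if_neg (by tauto)])]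
    have hs : PySem.Int.toChars n = decDigits n.toNat := toChars_nonneg n hn
    have hsd : ∀ c ∈ PySem.Int.toChars n, isDig c := by rw [hs]; exact decDigits_isDig _
    have hL : (PySem.Int.toChars n).length = (decDigits n.toNat).length := by rw [hs]
    have hnt : 0 < n.toNat := pos_of_even_len n hn hpar
    have hntoi : ((n.toNat : Nat) : Int) = n := Int.toNat_of_nonneg hn
    have hLpos : 1 ≤ (PySem.Int.toChars n).length / 2 := by
      have hlp : (decDigits n.toNat).length ≠ 0 :=
        fun hc => decDigits_ne_nil n.toNat (List.length_eq_zero_iff.mp hc)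
      omega
    have hfoldl : ∀ x : List Char,
        x.foldl (fun of num => of.erase num) (PySem.Int.toChars n)
          = (PySem.Int.toChars n).diff x := by
      intro x; rw [List.diff_eq_foldl]
    constructor
    · rintro (h | ⟨x, hxmem, hx0, hr0, hprod⟩)
      · exact absurd rfl h
      obtain ⟨hxlen, rest, hperm⟩ :=
        PySem.List.exists_perm_of_mem_permutations _ _ _ hxmem
      have hxlen' : x.length = (PySem.Int.toChars n).length / 2 := by
        rw [hxlen]; omega
      have hxdig : ∀ c ∈ x, isDig c :=
        fun c hc => hsd c (hperm.mem_iff.mp (List.mem_append.mpr (Or.inl hc)))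
      have hxne : x ≠ [] := by
        intro hc; rw [hc] at hxlen'; simp at hxlen'; omega
      have hxval : pyIntDigits x = ((valNat x : Nat) : Int) := pyIntDigits_eq_valNat x hxdig
      have ha0 : 0 < valNat x := valNat_pos x hxdig hxne hx0
      have hdx : decDigits (valNat x) = x := decDigits_valNat x hxdig hxne hx0
      rw [hfoldl] at hr0 hprod
      have hxsub : x.Subperm (PySem.Int.toChars n) :=
        (List.sublist_append_left x rest).subperm.trans hperm.subperm
      have hxr : (x ++ (PySem.Int.toChars n).diff x).Perm (PySem.Int.toChars n) :=
        perm_append_diff _ _ hxsub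
      have hrlen : ((PySem.Int.toChars n).diff x).length = (PySem.Int.toChars n).length / 2 := by
        have hle := hxr.length_eq
        simp only [List.length_append] at hle
        omega
      have hrdig : ∀ c ∈ (PySem.Int.toChars n).diff x, isDig c :=
        fun c hc => hsd c (List.diff_subset _ _ hc)
      have hrne : (PySem.Int.toChars n).diff x ≠ [] := by
        intro hc; rw [hc] at hrlen; simp at hrlen; omega
      have hrval : pyIntDigits ((PySem.Int.toChars n).diff x) =
          ((valNat ((PySem.Int.toChars n).diff x) : Nat) : Int) :=
        pyIntDigits_eq_valNat _ hrdig
      have hdr : decDigits (valNat ((PySem.Int.toChars n).diff x)) = (PySem.Int.toChars n).diff x :=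
        decDigits_valNat _ hrdig hrne hr0
      have hprodn : valNat x * valNat ((PySem.Int.toChars n).diff x) = n.toNat := by
        have : ((valNat x * valNat ((PySem.Int.toChars n).diff x) : Nat) : Int)
            = ((n.toNat : Nat) : Int) := by
          rw [hntoi]
          push_cast
          rw [← hxval, ← hrval]
          exact hprod
        exact_mod_cast this
      have hquot : n.toNat / valNat x = valNat ((PySem.Int.toChars n).diff x) := by
        rw [← hprodn]; exact Nat.mul_div_cancel_left _ ha0
      refine ⟨hpar, valNat x, ?_, ?_, ?_, ?_, ?_⟩
      · rw [List.mem_range, ← hL]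
        calc valNat x < 10 ^ x.length := valNat_lt x hxdig
          _ ≤ 10 ^ ((PySem.Int.toChars n).length / 2) := by rw [hxlen']
      · rw [hdx, ← hL]; exact hxlen'
      · rw [hdx, ← hs]; exact hxsub
      · exact ⟨_, hprodn.symm⟩
      · rw [hquot, hdx, hdr, ← hs]
    · rintro ⟨-, hR⟩
      obtain ⟨a, hamem, halen, hasub, hdvd, hre⟩ := hR
      have ha0 : 0 < a := by
        rcases Nat.eq_zero_or_pos a with rfl | h
        · exact absurd (Nat.eq_zero_of_zero_dvd hdvd) (by omega)
        · exact h
      have hq0 : 0 < n.toNat / a := Nat.div_pos (Nat.le_of_dvd hnt hdvd) ha0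
      have hxdig := decDigits_isDig a
      have hx0 : (decDigits a).head?.getD ' ' ≠ '0' := decDigits_head a ha0
      have hsub : (decDigits a).Subperm (PySem.Int.toChars n) := by
        rw [hs]; exact hasub
      have hmem := mem_permutations_of_subperm (decDigits a) (PySem.Int.toChars n) hsub
      have hlen2 : (decDigits a).length = ((((PySem.Int.toChars n).length : Int)) / 2).toNat := by
        rw [halen, ← hL]; omega
      rw [hlen2] at hmem
      have hdiff : (PySem.Int.toChars n).diff (decDigits a) = decDigits (n.toNat / a) := by
        rw [hs]; exact hre
      refine Or.inr ⟨decDigits a, hmem, hx0, ?_, ?_⟩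
      · rw [hfoldl, hdiff]
        exact decDigits_head _ hq0
      · rw [hfoldl, hdiff, pyIntDigits_eq_valNat _ hxdig, valNat_decDigits,
          pyIntDigits_eq_valNat _ (decDigits_isDig _), valNat_decDigits]
        have : a * (n.toNat / a) = n.toNat := Nat.mul_div_cancel' hdvd
        rw [← hntoi]
        exact_mod_cast congrArg (fun m : Nat => ((m : Nat) : Int)) this

-- ---- B-side: the option fold removes first occurrences, or fails on a missing digit ----

theorem foldl_remove_none (x : List Char) :
    x.foldl (fun (st : Option (List Char)) c =>
      st.bind (fun rest => if c ∈ rest then some (rest.erase c) else none)) none = none := by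
  induction x with
  | nil => rfl
  | cons c x ih => simpa using ih

theorem subperm_cons_iff_erase (c : Char) (x s : List Char) (hc : c ∈ s) :
    (c :: x).Subperm s ↔ x.Subperm (s.erase c) := by
  constructor
  · intro h
    exact (List.subperm_cons c).mp (h.trans (List.perm_cons_erase hc).subperm)
  · intro h
    exact ((List.subperm_cons c).mpr h).trans (List.perm_cons_erase hc).symm.subperm

theorem foldl_remove (x : List Char) : ∀ s : List Char,
    x.foldl (fun (st : Option (List Char)) c =>
        st.bind (fun rest => if c ∈ rest then some (rest.erase c) else none)) (some s)
      = if x.Subperm s then some (s.diff x) else none := by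
  induction x with
  | nil => intro s; simp
  | cons c x ih =>
    intro s
    simp only [List.foldl_cons, Option.bind_some]
    by_cases hc : c ∈ s
    · rw [if_pos hc, ih (s.erase c), List.diff_cons]
      by_cases hsub : x.Subperm (s.erase c)
      · rw [if_pos hsub, if_pos ((subperm_cons_iff_erase c x s hc).mpr hsub)]
      · rw [if_neg hsub, if_neg (fun h => hsub ((subperm_cons_iff_erase c x s hc).mp h))]
    · rw [if_neg hc, foldl_remove_none]
      rw [if_neg (fun h => hc (h.subset (by simp)))]

theorem L_B (n : Int) (hn : 0 ≤ n) :
    is_vampire_number_alt n = true ↔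
      ((PySem.Int.toChars n).length % 2 = 0 ∧ ResidualHit n) := by
  unfold is_vampire_number_alt
  simp only [pyStr, PySem.List.len_eq]
  by_cases hpar : (PySem.Int.toChars n).length % 2 = 0
  case neg =>
    rw [if_pos (by omega)]
    constructor
    · intro h; exact absurd h Bool.false_ne_true
    · rintro ⟨h, -⟩; exact absurd h hpar
  case pos =>
    rw [if_neg (by omega)]
    rw [List.any_eq_true]
    have hs : PySem.Int.toChars n = decDigits n.toNat := toChars_nonneg n hn
    have hsd : ∀ c ∈ PySem.Int.toChars n, isDig c := by rw [hs]; exact decDigits_isDig _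
    have hL : (PySem.Int.toChars n).length = (decDigits n.toNat).length := by rw [hs]
    have hnt : 0 < n.toNat := pos_of_even_len n hn hpar
    have hntoi : ((n.toNat : Nat) : Int) = n := Int.toNat_of_nonneg hn
    have hLpos : 1 ≤ (PySem.Int.toChars n).length / 2 := by
      have hlp : (decDigits n.toNat).length ≠ 0 :=
        fun hc => decDigits_ne_nil n.toNat (List.length_eq_zero_iff.mp hc)
      omega
    have he2 : ((((PySem.Int.toChars n).length : Int)) / 2).toNat
        = (PySem.Int.toChars n).length / 2 := by omega
    have he1 : ((((PySem.Int.toChars n).length : Int)) / 2 - 1).toNat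
        = (PySem.Int.toChars n).length / 2 - 1 := by omega
    constructor
    · rintro ⟨d, hdmem, hp⟩
      rw [PySem.List.mem_pyRange_one, he1, he2] at hdmem
      obtain ⟨hdlo, hdhi⟩ := hdmem
      have hd0 : (0:Int) < d := lt_of_lt_of_le (by positivity) hdlo
      by_cases hmod : PySem.Int.mod n d ≠ 0
      · rw [if_pos hmod] at hp
        exact absurd hp Bool.false_ne_true
      rw [if_neg hmod] at hp
      push_neg at hmod
      set a := d.toNat with hadef
      have had : ((a : Nat) : Int) = d := Int.toNat_of_nonneg (le_of_lt hd0)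
      have htca : PySem.Int.toChars d = decDigits a := by
        rw [toChars_nonneg d (le_of_lt hd0)]
      rw [htca, foldl_remove] at hp
      by_cases hsub : (decDigits a).Subperm (PySem.Int.toChars n)
      case neg => rw [if_neg hsub] at hp; exact absurd hp Bool.false_ne_true
      rw [if_pos hsub] at hp
      simp only [Bool.and_eq_true, decide_eq_true_eq, beq_iff_eq] at hp
      obtain ⟨hr0, hprod⟩ := hp
      have halo : 10 ^ ((PySem.Int.toChars n).length / 2 - 1) ≤ a := by
        rw [← Nat.cast_le (α := Int), cast_pow10, had]
        exact hdlo
      have hahi : a < 10 ^ ((PySem.Int.toChars n).length / 2) := by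
        rw [← Nat.cast_lt (α := Int), cast_pow10, had]
        exact hdhi
      have ha0 : 0 < a := lt_of_lt_of_le (pow_pos (by norm_num) _) halo
      have halen : (decDigits a).length = (PySem.Int.toChars n).length / 2 :=
        decDigits_length_eq _ _ hLpos halo hahi
      have hdvd : a ∣ n.toNat := by
        have hv : d ∣ n := (PySem.Int.mod_eq_zero_iff_dvd n d).mp hmod
        rw [← had, ← hntoi] at hv
        exact_mod_cast hv
      -- the residual: digits, length, nonempty, no leading zero
      have hxr : (decDigits a ++ (PySem.Int.toChars n).diff (decDigits a)).Perm
          (PySem.Int.toChars n) := perm_append_diff _ _ hsub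
      have hrlen : ((PySem.Int.toChars n).diff (decDigits a)).length
          = (PySem.Int.toChars n).length / 2 := by
        have hle := hxr.length_eq
        simp only [List.length_append] at hle
        omega
      have hrdig : ∀ c ∈ (PySem.Int.toChars n).diff (decDigits a), isDig c :=
        fun c hc => hsd c (List.diff_subset _ _ hc)
      have hrne : (PySem.Int.toChars n).diff (decDigits a) ≠ [] := by
        intro hc; rw [hc] at hrlen; simp at hrlen; omega
      have hrval : pyIntDigits ((PySem.Int.toChars n).diff (decDigits a)) =
          ((valNat ((PySem.Int.toChars n).diff (decDigits a)) : Nat) : Int) :=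
        pyIntDigits_eq_valNat _ hrdig
      have hdr : decDigits (valNat ((PySem.Int.toChars n).diff (decDigits a)))
          = (PySem.Int.toChars n).diff (decDigits a) :=
        decDigits_valNat _ hrdig hrne hr0
      have hprodn : valNat ((PySem.Int.toChars n).diff (decDigits a)) * a = n.toNat := by
        have : ((valNat ((PySem.Int.toChars n).diff (decDigits a)) * a : Nat) : Int)
            = ((n.toNat : Nat) : Int) := by
          rw [hntoi]
          push_cast
          rw [← hrval, had]
          exact hprod
        exact_mod_cast this
      have hquot : n.toNat / a = valNat ((PySem.Int.toChars n).diff (decDigits a)) := by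
        rw [← hprodn, mul_comm]; exact Nat.mul_div_cancel_left _ ha0
      refine ⟨hpar, a, ?_, ?_, ?_, hdvd, ?_⟩
      · rw [List.mem_range, ← hL]; exact hahi
      · rw [← hL]; exact halen
      · rw [← hs]; exact hsub
      · rw [hquot, hdr, ← hs]
    · rintro ⟨-, hR⟩
      obtain ⟨a, hamem, halen, hasub, hdvd, hre⟩ := hR
      have ha0 : 0 < a := by
        rcases Nat.eq_zero_or_pos a with rfl | h
        · exact absurd (Nat.eq_zero_of_zero_dvd hdvd) (by omega)
        · exact h
      obtain ⟨hblo, hbhi⟩ := decDigits_bounds a ha0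
      rw [halen, ← hL] at hblo hbhi
      have htca : PySem.Int.toChars ((a : Nat) : Int) = decDigits a := toChars_natCast a
      have hq0 : 0 < n.toNat / a := Nat.div_pos (Nat.le_of_dvd hnt hdvd) ha0
      refine ⟨((a : Nat) : Int), ?_, ?_⟩
      · rw [PySem.List.mem_pyRange_one, he1, he2]
        constructor
        · rw [← cast_pow10]; exact_mod_cast hblo
        · rw [← cast_pow10]; exact_mod_cast hbhi
      · have hmod : PySem.Int.mod n ((a : Nat) : Int) = 0 := by
          rw [PySem.Int.mod_eq_zero_iff_dvd, ← hntoi]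
          exact_mod_cast hdvd
        rw [if_neg (by simpa using hmod), htca, foldl_remove,
          if_pos (by rw [hs]; exact hasub)]
        have hdiff : (PySem.Int.toChars n).diff (decDigits a) = decDigits (n.toNat / a) := by
          rw [hs]; exact hre
        rw [hdiff]
        simp only [Bool.and_eq_true, decide_eq_true_eq, beq_iff_eq]
        refine ⟨decDigits_head _ hq0, ?_⟩
        rw [pyIntDigits_eq_valNat _ (decDigits_isDig _), valNat_decDigits]
        have : (n.toNat / a) * a = n.toNat := by
          rw [mul_comm]; exact Nat.mul_div_cancel' hdvd
        rw [← hntoi]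
        exact_mod_cast congrArg (fun m : Nat => ((m : Nat) : Int)) this

theorem A_odd (n : Int) (h : ¬ (PySem.Int.toChars n).length % 2 = 0) :
    is_vampire_number n = false := by
  unfold is_vampire_number
  simp only [pyStr, PySem.List.len_eq]
  rw [if_pos (by omega)]

theorem B_odd (n : Int) (h : ¬ (PySem.Int.toChars n).length % 2 = 0) :
    is_vampire_number_alt n = false := by
  unfold is_vampire_number_alt
  simp only [pyStr, PySem.List.len_eq]
  rw [if_pos (by omega)]

-- ===== VERDICT (by name: the statement is the Claim_ definition above) =====

theorem is_vampire_number_spec : Claim_equal_is_vampire_number := by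
  intro n _ hpre
  show is_vampire_number n = is_vampire_number_alt n
  by_cases hpar : (PySem.Int.toChars n).length % 2 = 0
  · have hn : 0 ≤ n := by
      rcases hpre with h | h
      · exact h
      · omega
    by_cases hR : ResidualHit n
    · rw [(L_A n hn).mpr ⟨hpar, hR⟩, (L_B n hn).mpr ⟨hpar, hR⟩]
    · have hA : is_vampire_number n = false := by
        cases h : is_vampire_number n
        · rfl
        · exact absurd ((L_A n hn).mp h).2 hR
      have hB : is_vampire_number_alt n = false := by
        cases h : is_vampire_number_alt n
        · rfl
        · exact absurd ((L_B n hn).mp h).2 hR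
      rw [hA, hB]
  · rw [A_odd n hpar, B_odd n hpar]
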